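-- pv_equiv track=rewrite | github.com/samertm/weather_study | code_/retrieve.py | generate_none_values
-- ===== SOURCE A (Python) =====
-- def generate_none_values(retrieved_data):
--     """Compose dictionary telling where `None` is found in data."""
--     none_values_found = {
--             'None among one whole lat_lon pair': None in [i[0:2]
--                     for i in retrieved_data],
--             'None in either lat or lon alone': None in
--                     [subelem for elem in retrieved_data
--                         for subelem in elem[0:2]
--                     ],
--             'None as one whole forecast': (None, None, None, None) in
--                     [subtuple for tupl in retrieved_data
--                         for subtuple in zip(
--                             tupl[2::4], tupl[3::4], tupl[4::4], tupl[5::4]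
--                         )
--                     ],
--             }
--     none_values_found['None within forecast but not as whole forecast'] = (
--             None in
--                 [subtuple for tupl in retrieved_data for subtuple in tupl]
--                 and not none_values_found['None as one whole forecast'])
--     return none_values_found
-- ===== SOURCE B (Python) =====
-- def generate_none_values(retrieved_data):
--     """Compose dictionary telling where `None` is found in data."""
--     alone = whole = anywhere = False
--     for elem in retrieved_data:
--         if len(elem) > 0 and elem[0] is None:
--             alone = True
--         if len(elem) > 1 and elem[1] is None:
--             alone = True
--         rest = elem[2:]
--         while len(rest) >= 4:
--             if rest[0] is None and rest[1] is None and rest[2] is None and rest[3] is None: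
--                 whole = True
--             rest = rest[4:]
--         if None in elem:
--             anywhere = True
--     return {
--         # A compares None against list slices here, which is never equal:
--         # the first entry is the constant False.
--         'None among one whole lat_lon pair': False,
--         'None in either lat or lon alone': alone,
--         'None as one whole forecast': whole,
--         'None within forecast but not as whole forecast': anywhere and not whole,
--     }
-- ===== Notes on version B (the rewrite author's own statement) =====
-- stated objective: simpler
-- what changed: B replaces A's four separate comprehension/slice/zip membership passes by one loop over the data that updates three boolean accumulators (first-two check by index, whole-forecast check by walking 4-blocks of elem[2:], None-anywhere by containment) and emits the always-False slice-vs-None entry as the constant False.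
import Mathlib
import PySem

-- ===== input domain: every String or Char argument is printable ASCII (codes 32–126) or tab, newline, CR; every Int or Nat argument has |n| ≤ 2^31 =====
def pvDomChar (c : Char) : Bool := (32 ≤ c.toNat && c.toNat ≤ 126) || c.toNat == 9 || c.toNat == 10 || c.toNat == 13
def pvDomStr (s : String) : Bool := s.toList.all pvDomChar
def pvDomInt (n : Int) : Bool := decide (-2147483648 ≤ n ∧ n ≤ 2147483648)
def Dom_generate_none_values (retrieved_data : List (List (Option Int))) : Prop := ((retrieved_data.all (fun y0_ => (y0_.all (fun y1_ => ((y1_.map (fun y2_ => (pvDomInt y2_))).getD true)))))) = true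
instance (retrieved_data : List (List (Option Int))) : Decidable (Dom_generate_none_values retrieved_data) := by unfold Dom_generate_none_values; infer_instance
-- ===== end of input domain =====

-- B replaces A's four slice/zip membership comprehensions by one loop with three
-- boolean accumulators (and the constant False for A's always-false slice-vs-None entry): simpler.


-- ===== PORT A =====
-- zip(a, b, c, d): truncates to the shortest list (hand port of 4-ary zip, exact)
def pyZip4 {α : Type} : List α → List α → List α → List α → List (α × α × α × α)
  | x :: a, y :: b, z :: c, w :: d => (x, y, z, w) :: pyZip4 a b c d
  | _, _, _, _ => []

-- tupl[k::4]; the step 4 is never 0, so slice? is always `some` and the `[]` default is never used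
def strideA (t : List (Option Int)) (k : Int) : List (Option Int) :=
  (PySem.List.slice? t (some k) none 4).getD []

def generate_none_values (retrieved_data : List (List (Option Int))) : List (String × Bool) :=
  -- 'None in [i[0:2] for i in retrieved_data]': Python compares None == <list slice>, always False
  let k1 := (retrieved_data.map (fun i => PySem.List.slice i (some 0) (some 2))).any (fun _ => false)
  let k2 := (retrieved_data.flatMap (fun elem => PySem.List.slice elem (some 0) (some 2))).contains none
  let k3 := (retrieved_data.flatMap (fun tupl =>
      pyZip4 (strideA tupl 2) (strideA tupl 3) (strideA tupl 4) (strideA tupl 5))).contains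
      ((none : Option Int), (none : Option Int), (none : Option Int), (none : Option Int))
  let k4 := (retrieved_data.flatMap (fun tupl => tupl)).contains none && !k3
  [("None among one whole lat_lon pair", k1),
   ("None in either lat or lon alone", k2),
   ("None as one whole forecast", k3),
   ("None within forecast but not as whole forecast", k4)]

-- ===== PORT B =====
-- 'while len(rest) >= 4: if rest[0] is None and … and rest[3] is None: whole = True; rest = rest[4:]'
def wholeScan : List (Option Int) → Bool
  | a :: b :: c :: d :: rest =>
      ((((a == none) && (b == none)) && (c == none)) && (d == none)) || wholeScan rest
  | _ => false

def altStep (st : Bool × Bool × Bool) (elem : List (Option Int)) : Bool × Bool × Bool :=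
  let alone1 := st.1 || (decide (0 < elem.length) && (elem[0]? == some none))
  let alone := alone1 || (decide (1 < elem.length) && (elem[1]? == some none))
  let whole := st.2.1 || wholeScan (PySem.List.slice elem (some 2) none)
  let anywhere := st.2.2 || elem.contains none
  (alone, whole, anywhere)

def generate_none_values_alt (retrieved_data : List (List (Option Int))) : List (String × Bool) :=
  let st := retrieved_data.foldl altStep (false, false, false)
  [("None among one whole lat_lon pair", false),
   ("None in either lat or lon alone", st.1),
   ("None as one whole forecast", st.2.1),
   ("None within forecast but not as whole forecast", st.2.2 && !st.2.1)]

-- ===== PRECONDITION & SPEC =====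
def Spec_generate_none_values (retrieved_data : List (List (Option Int))) (out : List (String × Bool)) : Prop := out = generate_none_values_alt retrieved_data
instance (retrieved_data : List (List (Option Int))) (out : List (String × Bool)) : Decidable (Spec_generate_none_values retrieved_data out) := by unfold Spec_generate_none_values; infer_instance

-- ===== CLAIM (what is proved, stated in full; the proofs are below) =====
def Claim_equal_generate_none_values : Prop := ∀ (retrieved_data : List (List (Option Int))), Dom_generate_none_values retrieved_data → Spec_generate_none_values retrieved_data (generate_none_values retrieved_data)

-- ===== LEMMAS AND PROOFS =====

-- every 4th element, starting at the head
def every4 {α : Type} : List α → List α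
  | [] => []
  | a :: t => a :: every4 (t.drop 3)
  termination_by l => l.length
  decreasing_by simp

-- consecutive complete 4-blocks
def chunks4 : List (Option Int) → List ((Option Int) × (Option Int) × (Option Int) × (Option Int))
  | [] => []
  | [_] => []
  | [_, _] => []
  | [_, _, _] => []
  | a :: b :: c :: d :: rest => (a, b, c, d) :: chunks4 rest

theorem filterMap_every4 {α : Type} (ys : List α) :
    List.filterMap (fun k => ys[4 * k]?) (List.range ((((ys.length : Int)) + 3) / 4).toNat)
      = every4 ys := by
  induction ys using every4.induct with
  | case1 => simp [every4]
  | case2 a t ih =>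
    have hc : (((((a :: t).length : Int)) + 3) / 4).toNat
        = ((((((t.drop 3).length : Int)) + 3) / 4).toNat) + 1 := by
      simp; omega
    rw [hc, List.range_succ_eq_map, List.filterMap_cons]
    simp only [List.filterMap_map]
    have hf : ∀ k, ((fun k => (a :: t)[4 * k]?) ∘ Nat.succ) k = (fun k => (t.drop 3)[4 * k]?) k := by
      intro k
      simp only [Function.comp]
      have h1 : 4 * Nat.succ k = (4 * k + 3) + 1 := by omega
      rw [h1, List.getElem?_cons_succ, List.getElem?_drop]
      congr 1; omega
    rw [List.filterMap_congr (fun x _ => hf x), ih]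
    simp [every4]

theorem sliceq_every4 (t : List (Option Int)) (k : Nat) :
    PySem.List.slice? t (some (k : Int)) none 4 = some (every4 (t.drop k)) := by
  simp only [PySem.List.slice?, PySem.List.sliceIndices]
  norm_num
  have hk0 : ¬ ((k : Int) < 0) := by omega
  simp only [if_neg hk0]
  by_cases h : k < t.length
  · rw [if_pos (by omega : min (k : Int) ↑t.length < (t.length : Int))]
    have hone : (min (k : Int) ↑t.length) = (k : Int) := by omega
    rw [hone]
    have hcnt : (((↑t.length - (k : Int)) + 4 - 1) / 4).toNat
        = ((((t.drop k).length : Int) + 3) / 4).toNat := by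
      simp; omega
    rw [hcnt, ← filterMap_every4 (t.drop k)]
    congr 1
    funext x
    rw [List.getElem?_drop]
    congr 1
  · rw [if_neg (by omega : ¬ (min (k : Int) ↑t.length < (t.length : Int)))]
    have hd : t.drop k = [] := List.drop_eq_nil_of_le (by omega)
    simp [hd, every4]

theorem zip4_every4 (ys : List (Option Int)) :
    pyZip4 (every4 ys) (every4 (ys.drop 1)) (every4 (ys.drop 2)) (every4 (ys.drop 3))
      = chunks4 ys := by
  induction ys using chunks4.induct <;>
    simp_all [every4, pyZip4, chunks4, List.drop_one]

theorem chunks4_contains (ys : List (Option Int)) :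
    (chunks4 ys).contains ((none : Option Int), (none : Option Int), (none : Option Int), (none : Option Int))
      = wholeScan ys := by
  induction ys using chunks4.induct with
  | case1 => rfl
  | case2 _ => rfl
  | case3 _ _ => rfl
  | case4 _ _ _ => rfl
  | case5 a b c d rest ih =>
    simp only [chunks4, wholeScan, List.contains_cons, ← ih]
    cases a <;> cases b <;> cases c <;> cases d <;> simp

theorem strideA_eq (t : List (Option Int)) (k : Nat) : strideA t (k : Int) = every4 (t.drop k) := by
  rw [strideA, sliceq_every4]; rfl

-- per-element value of A's key3 list = B's wholeScan
theorem key3_elem (t : List (Option Int)) :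
    (pyZip4 (strideA t 2) (strideA t 3) (strideA t 4) (strideA t 5)).contains
      ((none : Option Int), (none : Option Int), (none : Option Int), (none : Option Int))
      = wholeScan (PySem.List.slice t (some 2) none) := by
  have h2 : strideA t 2 = every4 (t.drop 2) := by simpa using strideA_eq t 2
  have h3 : strideA t 3 = every4 (t.drop 3) := by simpa using strideA_eq t 3
  have h4 : strideA t 4 = every4 (t.drop 4) := by simpa using strideA_eq t 4
  have h5 : strideA t 5 = every4 (t.drop 5) := by simpa using strideA_eq t 5
  have hz := zip4_every4 (t.drop 2)
  simp only [List.drop_drop] at hz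
  norm_num at hz
  have hslice : PySem.List.slice t (some 2) none = t.drop 2 := by
    have := PySem.List.slice_from t (a := 2) (by norm_num)
    simpa using this
  rw [h2, h3, h4, h5, hz, chunks4_contains, hslice]

-- per-element value of A's key2 list = B's first-two check
theorem key2_elem (e : List (Option Int)) :
    (PySem.List.slice e (some 0) (some 2)).contains (none : Option Int)
      = ((decide (0 < e.length) && (e[0]? == some none)) || (decide (1 < e.length) && (e[1]? == some none))) := by
  have hs : PySem.List.slice e (some 0) (some 2) = e.take 2 := by
    rw [PySem.List.slice_zero_start]
    have := PySem.List.slice_to e (b := 2) (by norm_num)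
    simpa using this
  rw [hs]
  match e with
  | [] => rfl
  | [a] => cases a <;> simp
  | a :: b :: t => cases a <;> cases b <;> simp

theorem flatMap_contains {α β : Type} [BEq β] (l : List α) (f : α → List β) (x : β) :
    (l.flatMap f).contains x = l.any (fun e => (f e).contains x) := by
  induction l with
  | nil => rfl
  | cons h t ih => rw [List.flatMap_cons, List.contains_append, List.any_cons, ih]

theorem foldl_altStep (rd : List (List (Option Int))) (a0 w0 n0 : Bool) :
    rd.foldl altStep (a0, w0, n0)
      = (a0 || rd.any (fun e => ((decide (0 < e.length) && (e[0]? == some none)) || (decide (1 < e.length) && (e[1]? == some none)))),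
         w0 || rd.any (fun e => wholeScan (PySem.List.slice e (some 2) none)),
         n0 || rd.any (fun e => e.contains none)) := by
  induction rd generalizing a0 w0 n0 with
  | nil => simp
  | cons h t ih => simp [List.foldl_cons, altStep, ih, Bool.or_assoc]

-- ===== VERDICT (by name: the statement is the Claim_ definition above) =====
theorem generate_none_values_spec : Claim_equal_generate_none_values := by
  intro rd _
  show _ = _
  rw [generate_none_values, generate_none_values_alt, foldl_altStep]
  simp only [flatMap_contains, key3_elem, key2_elem, List.any_map]
  simp [Function.comp_def]
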